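-- pv_equiv track=rewrite | github.com/zhenyu1311/Ranking-App_Streamlit | food_ranker_v2.py | build_win_graph
-- ===== SOURCE A (Python) =====
-- from typing import Dict, List, Tuple, Optional
--
-- def build_win_graph(pair_wins: Dict[str, str]) -> Dict[str, set]:
--     """Adjacency: winner -> {losers} using direct decisions only."""
--     g: Dict[str, set] = {}
--     for k, winner in pair_wins.items():
--         a, b = k.split("|", 1)
--         loser = b if winner == a else a
--         g.setdefault(winner, set()).add(loser)
--         g.setdefault(loser, set())
--     return g
-- ===== SOURCE B (Python) =====
-- from typing import Dict
--
-- def build_win_graph(pair_wins: Dict[str, str]) -> Dict[str, set]: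
--     """Adjacency: winner -> {losers} using direct decisions only."""
--     edges = []
--     for k, winner in pair_wins.items():
--         a, b = k.split("|", 1)
--         edges.append((winner, b if winner == a else a))
--     nodes = dict.fromkeys(x for e in edges for x in e)
--     return {n: {l for w, l in edges if w == n} for n in nodes}
-- ===== Notes on version B (the rewrite author's own statement) =====
-- stated objective: alternative
-- what changed: A builds the graph incrementally by mutating a dict (setdefault/add) per decision; B first extracts the (winner, loser) edge list, then derives the node order by ordered dedup (dict.fromkeys) and each loser-set by a per-node filter comprehension.
import Mathlib
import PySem

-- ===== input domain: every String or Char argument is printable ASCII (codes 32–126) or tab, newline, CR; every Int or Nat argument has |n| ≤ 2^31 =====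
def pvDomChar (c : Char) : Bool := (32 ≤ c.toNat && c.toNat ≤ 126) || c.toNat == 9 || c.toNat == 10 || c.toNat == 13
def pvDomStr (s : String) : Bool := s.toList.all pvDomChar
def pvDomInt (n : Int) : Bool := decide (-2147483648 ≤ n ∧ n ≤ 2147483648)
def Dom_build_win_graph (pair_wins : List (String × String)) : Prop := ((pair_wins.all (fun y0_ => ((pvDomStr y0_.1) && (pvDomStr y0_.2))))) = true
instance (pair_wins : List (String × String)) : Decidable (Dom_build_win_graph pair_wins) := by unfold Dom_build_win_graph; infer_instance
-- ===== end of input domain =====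

-- B rebuilds the graph non-incrementally: it extracts the (winner, loser) edge list first,
-- then gets the node order by ordered dedup and each loser-set by a per-node filter,
-- instead of A's single mutating-dict fold (objective: alternative decomposition).


-- ===== PORT A =====
-- one iteration of A's loop: split the key, pick the loser, setdefault(winner).add(loser), setdefault(loser)
def pvStepA (g : PySem.Dict String (PySem.Set String)) (kv : String × String) : PySem.Dict String (PySem.Set String) :=
  match PySem.Str.splitMax? kv.1 "|" 1 with
  | some [a, b] =>
      let winner := kv.2
      let loser := if winner == a then b else a
      -- g.setdefault(winner, set()).add(loser) mutates the set stored under winner: modify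
      (g.modify winner PySem.Set.empty (fun s => PySem.Set.add s loser)).setdefault loser PySem.Set.empty
  | _ => g   -- Python raises ValueError here (key without "|"); excluded by Pre_

def build_win_graph (pair_wins : List (String × String)) : List (String × List String) :=
  (pair_wins.foldl pvStepA PySem.Dict.empty).items

-- ===== PORT B =====
-- the (winner, loser) edge of one decision
def pvEdge (kv : String × String) : String × String :=
  match PySem.Str.splitMax? kv.1 "|" 1 with
  | some [a, b] => (kv.2, if kv.2 == a then b else a)
  | _ => (kv.2, kv.2)   -- Python raises ValueError here; excluded by Pre_

def build_win_graph_alt (pair_wins : List (String × String)) : List (String × List String) :=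
  let edges := pair_wins.map pvEdge
  let nodes := PySem.List.dedup (edges.flatMap (fun e => [e.1, e.2]))   -- dict.fromkeys
  nodes.map (fun n => (n, PySem.Set.ofList ((edges.filter (fun e => e.1 == n)).map (fun e => e.2))))

-- ===== PRECONDITION & SPEC =====
-- Pre_ excludes inputs with a key not containing "|": there A's unpacking of k.split("|", 1) raises ValueError.
def Pre_build_win_graph (pair_wins : List (String × String)) : Prop :=
  ∀ p ∈ pair_wins, '|' ∈ p.1.toList
instance (pair_wins : List (String × String)) : Decidable (Pre_build_win_graph pair_wins) := by unfold Pre_build_win_graph; infer_instance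

def pvWitness_build_win_graph : (List (String × String)) := [("pizza|sushi", "pizza"), ("pizza|taco", "taco")]

def Spec_build_win_graph (pair_wins : List (String × String)) (out : List (String × List String)) : Prop := out = build_win_graph_alt pair_wins
instance (pair_wins : List (String × String)) (out : List (String × List String)) : Decidable (Spec_build_win_graph pair_wins out) := by unfold Spec_build_win_graph; infer_instance

-- ===== CLAIM (what is proved, stated in full; the proofs are below) =====
def Claim_equal_build_win_graph : Prop := ∀ (pair_wins : List (String × String)), Dom_build_win_graph pair_wins → Pre_build_win_graph pair_wins → Spec_build_win_graph pair_wins (build_win_graph pair_wins)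

-- ===== LEMMAS AND PROOFS =====

-- A's loop body expressed on an already-extracted edge (proof helper)
def pvStepE (g : PySem.Dict String (PySem.Set String)) (e : String × String) : PySem.Dict String (PySem.Set String) :=
  (g.modify e.1 PySem.Set.empty (fun s => PySem.Set.add s e.2)).setdefault e.2 PySem.Set.empty

-- splitOnMax.go with maxsplit budget 0 returns the remainder as the last piece
lemma pv_go_zero (fuel : Nat) (l cur : List Char) (acc : List (List Char)) :
    PySem.Chars.splitOnMax.go ['|'] fuel 0 l cur acc = ((cur.reverse ++ l) :: acc).reverse := by
  cases fuel with
  | zero => rfl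
  | succ f => cases l with
    | nil => simp [PySem.Chars.splitOnMax.go]
    | cons c rest => simp [PySem.Chars.splitOnMax.go]

-- with budget 1 and a '|' present, go produces exactly two further pieces
lemma pv_go_one (cs : List Char) : ∀ (fuel : Nat) (cur : List Char) (acc : List (List Char)),
    cs.length < fuel → '|' ∈ cs →
    ∃ x y, PySem.Chars.splitOnMax.go ['|'] fuel 1 cs cur acc = acc.reverse ++ [x, y] := by
  induction cs with
  | nil => intro fuel cur acc _ h; simp at h
  | cons c rest ih =>
    intro fuel cur acc hf h
    cases fuel with
    | zero => simp at hf
    | succ f =>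
      by_cases hc : c = '|'
      · refine ⟨cur.reverse, rest, ?_⟩
        simp [PySem.Chars.splitOnMax.go, hc, List.isPrefixOf, pv_go_zero]
      · have hmem : '|' ∈ rest := by
          rcases List.mem_cons.mp h with h1 | h1
          · exact absurd h1.symm hc
          · exact h1
        have hpre : (List.isPrefixOf ['|'] (c :: rest)) = false := by
          simp [List.isPrefixOf]
          exact fun he => absurd he.symm hc
        obtain ⟨x, y, hxy⟩ := ih f (c :: cur) acc (by simpa using hf) hmem
        refine ⟨x, y, ?_⟩
        simpa [PySem.Chars.splitOnMax.go, hpre] using hxy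

-- a key containing '|' splits under k.split("|", 1) into exactly two pieces
lemma pv_split_two (k : String) (h : '|' ∈ k.toList) :
    ∃ a b, PySem.Str.splitMax? k "|" 1 = some [a, b] := by
  obtain ⟨x, y, hxy⟩ := pv_go_one k.toList (k.toList.length + 1) [] [] (by omega) h
  have hchars : PySem.Chars.splitMax? k.toList "|".toList 1 = some [x, y] := by
    simp only [PySem.Chars.splitMax?, PySem.Chars.splitOnMax]
    norm_num
    simpa using hxy
  have hmap := PySem.Str.splitMax?_map k "|" 1
  rw [hchars] at hmap
  cases hs : PySem.Str.splitMax? k "|" 1 with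
  | none => rw [hs] at hmap; simp at hmap
  | some l =>
    rw [hs] at hmap
    simp only [Option.map_some, Option.some.injEq] at hmap
    match l, hmap with
    | [a, b], _ => exact ⟨a, b, rfl⟩

-- under Pre_, A's loop body is B's edge extraction followed by the edge step
lemma pv_stepA_eq (g : PySem.Dict String (PySem.Set String)) (kv : String × String)
    (h : '|' ∈ kv.1.toList) : pvStepA g kv = pvStepE g (pvEdge kv) := by
  obtain ⟨a, b, hs⟩ := pv_split_two kv.1 h
  simp [pvStepA, pvEdge, pvStepE, hs]

-- keys after one edge step: winner then loser appended if new
lemma pv_keys_step (d : PySem.Dict String (PySem.Set String)) (e : String × String) :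
    (pvStepE d e).keys = PySem.Set.add (PySem.Set.add d.keys e.1) e.2 := by
  have h1 : (d.modify e.1 PySem.Set.empty (fun s => PySem.Set.add s e.2)).keys = PySem.Set.add d.keys e.1 := by
    rw [PySem.Dict.keys_modify]
    by_cases hc : d.contains e.1 = true
    · rw [PySem.Dict.keys_insert_of_contains _ _ hc,
        PySem.Set.add_of_mem ((PySem.Dict.contains_iff_mem_keys d e.1).mp hc)]
    · have hc' : d.contains e.1 = false := by simpa using hc
      rw [PySem.Dict.keys_insert_of_not_contains _ _ hc',
        PySem.Set.add_of_not_mem (fun hm => hc ((PySem.Dict.contains_iff_mem_keys d e.1).mpr hm))]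
  simp only [pvStepE]
  rw [PySem.Dict.keys_setdefault, h1]
  by_cases h2 : e.2 ∈ PySem.Set.add d.keys e.1
  · have hc2 : (d.modify e.1 PySem.Set.empty (fun s => PySem.Set.add s e.2)).contains e.2 = true := by
      rw [PySem.Dict.contains_modify]
      rcases (PySem.Set.mem_add _ _ _).mp h2 with hm | hm
      · simp [(PySem.Dict.contains_iff_mem_keys d e.2).mpr hm]
      · simp [hm]
    rw [if_pos hc2, PySem.Set.add_of_mem h2]
  · have hc2 : (d.modify e.1 PySem.Set.empty (fun s => PySem.Set.add s e.2)).contains e.2 = false := by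
      rw [PySem.Dict.contains_modify]
      have hne : (e.2 == e.1) = false := by
        simp only [beq_eq_false_iff_ne, ne_eq]
        exact fun hm => h2 ((PySem.Set.mem_add _ _ _).mpr (Or.inr hm))
      have hnm : d.contains e.2 = false := by
        cases hcc : d.contains e.2 with
        | false => rfl
        | true => exact absurd ((PySem.Dict.contains_iff_mem_keys d e.2).mp hcc) (fun hm => h2 ((PySem.Set.mem_add _ _ _).mpr (Or.inl hm)))
      rw [hne, hnm]
      rfl
    rw [if_neg (by simp only [hc2, Bool.false_eq_true, not_false_eq_true]), PySem.Set.add_of_not_mem h2]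

-- value looked up after one edge step: the loser is added under the winner's key, others untouched
lemma pv_getD_step (d : PySem.Dict String (PySem.Set String)) (e : String × String) (n : String) :
    (pvStepE d e).getD n PySem.Set.empty =
      if n = e.1 then PySem.Set.add (d.getD e.1 PySem.Set.empty) e.2 else d.getD n PySem.Set.empty := by
  have hsd : ∀ (X : PySem.Dict String (PySem.Set String)),
      (X.setdefault e.2 PySem.Set.empty).getD n PySem.Set.empty = X.getD n PySem.Set.empty := by
    intro X
    by_cases hn : n = e.2
    · subst hn; exact PySem.Dict.getD_setdefault_self X e.2 PySem.Set.empty PySem.Set.empty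
    · rw [PySem.Dict.getD_eq_get?_getD, PySem.Dict.get?_setdefault_of_ne _ _ hn,
        ← PySem.Dict.getD_eq_get?_getD]
  simp only [pvStepE]
  rw [hsd, PySem.Dict.getD_modify]

-- the fold's key list is the seed updated with all edge endpoints in encounter order
lemma pv_keys_fold (edges : List (String × String)) : ∀ (d : PySem.Dict String (PySem.Set String)),
    (edges.foldl pvStepE d).keys = PySem.Set.update d.keys (edges.flatMap (fun e => [e.1, e.2])) := by
  induction edges with
  | nil => intro d; simp [PySem.Set.update_nil]
  | cons e rest ih =>
    intro d
    simp only [List.foldl_cons, List.flatMap_cons, List.cons_append, List.nil_append]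
    rw [ih, pv_keys_step, PySem.Set.update_cons, PySem.Set.update_cons]

-- the fold's value under n is the seed's value updated with n's losers in encounter order
lemma pv_getD_fold (edges : List (String × String)) : ∀ (d : PySem.Dict String (PySem.Set String)) (n : String),
    (edges.foldl pvStepE d).getD n PySem.Set.empty =
      PySem.Set.update (d.getD n PySem.Set.empty) ((edges.filter (fun e => e.1 == n)).map (fun e => e.2)) := by
  induction edges with
  | nil => intro d n; simp [PySem.Set.update_nil]
  | cons e rest ih =>
    intro d n
    simp only [List.foldl_cons, List.filter_cons]
    rw [ih, pv_getD_step]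
    by_cases hn : n = e.1
    · simp only [hn, beq_self_eq_true, if_pos, List.map_cons, PySem.Set.update_cons]
    · have hb : (e.1 == n) = false := by
        simp only [beq_eq_false_iff_ne, ne_eq]
        exact fun hh => hn hh.symm
      simp [hn, hb]

-- ===== VERDICT (by name: the statement is the Claim_ definition above) =====
theorem build_win_graph_spec : Claim_equal_build_win_graph := by
  intro pw _ hpre
  show build_win_graph pw = build_win_graph_alt pw
  have hfold : pw.foldl pvStepA PySem.Dict.empty = (pw.map pvEdge).foldl pvStepE PySem.Dict.empty := by
    rw [List.foldl_map]
    exact PySem.List.foldl_congr_mem pw _ _ _ (fun acc x hx => pv_stepA_eq acc x (hpre x hx))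
  have hkeys : ((pw.map pvEdge).foldl pvStepE PySem.Dict.empty).keys
      = PySem.Set.ofList ((pw.map pvEdge).flatMap (fun e => [e.1, e.2])) := by
    rw [pv_keys_fold]
    simp [PySem.Dict.keys_empty, PySem.Set.update_nil_left]
  have hnd : ((pw.map pvEdge).foldl pvStepE PySem.Dict.empty).keys.Nodup := by
    rw [hkeys]; exact PySem.Set.nodup_ofList _
  have hB : build_win_graph_alt pw
      = (PySem.Set.ofList ((pw.map pvEdge).flatMap (fun e => [e.1, e.2]))).map
          (fun n => (n, PySem.Set.ofList (((pw.map pvEdge).filter (fun e => e.1 == n)).map (fun e => e.2)))) := rfl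
  unfold build_win_graph
  rw [hfold, PySem.Dict.items_eq_map_keys _ hnd PySem.Set.empty, hkeys, hB]
  refine List.map_congr_left (fun n _ => ?_)
  rw [pv_getD_fold, PySem.Dict.getD_empty]
  rw [show (PySem.Set.empty : PySem.Set String) = [] from rfl, PySem.Set.update_nil_left]
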